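-- pv_equiv track=rewrite | github.com/pablowatfi/yalom | src/rag/safety.py | is_prompt_injection_in_history
-- ===== SOURCE A (Python) =====
-- TRIGGERS = [
--     "ignore instructions",
--     "ignore your instructions",
--     "ignore all instructions",
--     "forget instructions",
--     "forget previous instructions",
--     "ignore previous",
--     "disregard previous",
--     "system prompt",
--     "developer message",
--     "jailbreak",
--     "bypass safety",
--     "override instructions",
-- ]
--
-- def is_prompt_injection(text: str) -> bool:
--     if not text:
--         return False
--     lowered = text.lower()
--     return any(t in lowered for t in TRIGGERS)
--
-- def is_prompt_injection_in_history(history) -> bool: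
--     if not isinstance(history, list):
--         return False
--     for item in history:
--         content = item.get("content") if isinstance(item, dict) else None
--         if content and is_prompt_injection(content):
--             return True
--     return False
-- ===== SOURCE B (Python) =====
-- TRIGGERS = [
--     "ignore instructions",
--     "ignore your instructions",
--     "ignore all instructions",
--     "forget instructions",
--     "forget previous instructions",
--     "ignore previous",
--     "disregard previous",
--     "system prompt",
--     "developer message",
--     "jailbreak",
--     "bypass safety",
--     "override instructions",
-- ]
--
-- _END = "$end$"
--
--
-- def _build_trie(words):
--     root = {}
--     for w in words:
--         node = root
--         for ch in w:
--             node = node.setdefault(ch, {})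
--         node[_END] = True
--     return root
--
--
-- # Prefix trie over all trigger phrases, built once: the 12 phrases share prefixes
-- # ("ignore ", "forget ", ...) and are matched together by one trie walk per position.
-- _TRIE = _build_trie(TRIGGERS)
--
--
-- def _trie_match_at(s, i):
--     node = _TRIE
--     for j in range(i, len(s)):
--         node = node.get(s[j])
--         if node is None:
--             return False
--         if _END in node:
--             return True
--     return False
--
--
-- def is_prompt_injection_in_history(history) -> bool:
--     if not isinstance(history, list):
--         return False
--     for item in history:
--         content = item.get("content") if isinstance(item, dict) else None
--         if content:
--             lowered = content.lower()
--             if any(_trie_match_at(lowered, i) for i in range(len(lowered))):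
--                 return True
--     return False
-- ===== Notes on version B (the rewrite author's own statement) =====
-- stated objective: alternative
-- what changed: Replaces A's 12 independent substring 'in' scans per message with a prefix trie over all trigger phrases built once at import time; each message is checked by walking the shared trie from each start position, so common prefixes of the phrases are matched only once.
import Mathlib
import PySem

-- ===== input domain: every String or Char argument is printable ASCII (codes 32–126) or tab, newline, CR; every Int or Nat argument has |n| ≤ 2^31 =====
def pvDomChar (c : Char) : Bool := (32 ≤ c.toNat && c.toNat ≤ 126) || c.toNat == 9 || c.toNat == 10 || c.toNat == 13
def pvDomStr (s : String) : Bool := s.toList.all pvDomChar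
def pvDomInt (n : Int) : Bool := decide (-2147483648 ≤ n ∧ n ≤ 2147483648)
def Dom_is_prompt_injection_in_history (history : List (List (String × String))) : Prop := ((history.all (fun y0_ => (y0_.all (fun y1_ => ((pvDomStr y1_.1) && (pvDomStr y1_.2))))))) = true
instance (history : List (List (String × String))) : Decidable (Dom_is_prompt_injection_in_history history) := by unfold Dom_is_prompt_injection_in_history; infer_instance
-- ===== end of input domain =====

-- B builds a prefix trie over the 12 trigger phrases once and checks each message by
-- one trie walk per start position (shared prefixes matched together), instead of A's
-- 12 independent substring scans; same return value everywhere.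


-- ===== PORT A =====
def pyTriggers : List String :=
  ["ignore instructions", "ignore your instructions", "ignore all instructions",
   "forget instructions", "forget previous instructions", "ignore previous",
   "disregard previous", "system prompt", "developer message", "jailbreak",
   "bypass safety", "override instructions"]

-- is_prompt_injection: empty text → False, else any of the 12 triggers 'in' text.lower()
def is_prompt_injection (text : String) : Bool :=
  if text = "" then false
  else pyTriggers.any (fun t => PySem.Str.isIn t (PySem.Str.lower text))

def is_prompt_injection_in_history (history : List (List (String × String))) : Bool :=
  history.any (fun item =>
    match (PySem.Dict.mk item).get? "content" with
    | none => false
    | some content => if content = "" then false else is_prompt_injection content)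

-- ===== PORT B =====
-- Python B's trie is a dict of dicts; ported exactly as a first-child/next-sibling
-- tree (hand port: no nested inductive allowed): `node c accept child sibling` is the
-- dict entry for key c whose value has end-marker `accept`, sub-dict `child`, and
-- `sibling` the remaining entries of the same dict.
inductive Trie where
  | nil : Trie
  | node : Char → Bool → Trie → Trie → Trie
deriving DecidableEq, Repr

-- fresh chain of setdefault-created nodes for the rest of a word
def linearTrie : List Char → Trie
  | [] => .nil
  | x :: xs => .node x (xs = []) (linearTrie xs) .nil

-- node.setdefault walk + end marker: insert one word into the trie
def trieInsert : Trie → List Char → Trie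
  | t, [] => t
  | .nil, x :: xs => linearTrie (x :: xs)
  | .node c a ch sib, x :: xs =>
      if c = x then .node c (a || xs = []) (trieInsert ch xs) sib
      else .node c a ch (trieInsert sib (x :: xs))
  termination_by structural t => t

-- _build_trie(TRIGGERS), built once
def pyTrie : Trie := pyTriggers.foldl (fun t w => trieInsert t w.toList) .nil

-- _trie_match_at: walk the trie along the suffix starting at position i
def trieRun : Trie → List Char → Bool
  | .nil, _ => false
  | .node _ _ _ _, [] => false
  | .node c a ch sib, x :: xs =>
      (if c = x then a || trieRun ch xs else false) || trieRun sib (x :: xs)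
  termination_by structural t => t

def is_prompt_injection_in_history_alt (history : List (List (String × String))) : Bool :=
  history.any (fun item =>
    match (PySem.Dict.mk item).get? "content" with
    | none => false
    | some content =>
        if content = "" then false
        else
          let lowered := PySem.Chars.lower content.toList
          (List.range lowered.length).any (fun i => trieRun pyTrie (lowered.drop i)))

-- ===== PRECONDITION & SPEC =====
def Spec_is_prompt_injection_in_history (history : List (List (String × String))) (out : Bool) : Prop := out = is_prompt_injection_in_history_alt history
instance (history : List (List (String × String))) (out : Bool) : Decidable (Spec_is_prompt_injection_in_history history out) := by unfold Spec_is_prompt_injection_in_history; infer_instance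

-- ===== CLAIM =====
def Claim_equal_is_prompt_injection_in_history : Prop := ∀ (history : List (List (String × String))), Dom_is_prompt_injection_in_history history → Spec_is_prompt_injection_in_history history (is_prompt_injection_in_history history)

-- ===== LEMMAS AND PROOFS =====

-- the language of a trie: all words it accepts
def trieWords : Trie → List (List Char)
  | .nil => []
  | .node c a ch sib =>
      (if a then [[c]] else []) ++ (trieWords ch).map (c :: ·) ++ trieWords sib

lemma trieWords_ne_nil : ∀ (t : Trie), ∀ w ∈ trieWords t, w ≠ [] := by
  intro t
  induction t with
  | nil => simp [trieWords]
  | node c a ch sib ihc ihs =>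
      intro w hw
      simp only [trieWords, List.mem_append, List.mem_map] at hw
      rcases hw with (hw | ⟨w', _, rfl⟩) | hw
      · split at hw <;> simp_all
      · simp
      · exact ihs w hw

-- the trie walk finds exactly the accepted words that are prefixes of the text
lemma trieRun_iff (t : Trie) (cs : List Char) :
    trieRun t cs = true ↔ ∃ w ∈ trieWords t, w <+: cs := by
  induction t generalizing cs with
  | nil => simp [trieRun, trieWords]
  | node c a ch sib ihc ihs =>
      cases cs with
      | nil =>
          simp only [trieRun, Bool.false_eq_true, false_iff]
          rintro ⟨w, hw, hpre⟩
          exact trieWords_ne_nil _ w hw (List.prefix_nil.mp hpre)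
      | cons x xs =>
          simp only [trieRun, Bool.or_eq_true, trieWords, List.mem_append, List.mem_map]
          constructor
          · rintro (h | h)
            · split_ifs at h with hc
              · subst hc
                rw [Bool.or_eq_true] at h
                rcases h with h | h
                · exact ⟨[c], Or.inl (Or.inl (by simp [h])), by simp⟩
                · obtain ⟨w, hw, hpre⟩ := (ihc xs).mp h
                  exact ⟨c :: w, Or.inl (Or.inr ⟨w, hw, rfl⟩), by simpa using hpre⟩
            · obtain ⟨w, hw, hpre⟩ := (ihs (x :: xs)).mp h
              exact ⟨w, Or.inr hw, hpre⟩
          · rintro ⟨w, (hw | ⟨w', hw', rfl⟩) | hw, hpre⟩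
            · have ha : a = true ∧ w = [c] := by split at hw <;> simp_all
              obtain ⟨ha, rfl⟩ := ha
              have hx : c = x := (List.cons_prefix_cons.mp hpre).1
              left; simp [hx, ha]
            · have hcx := List.cons_prefix_cons.mp hpre
              left; simp [hcx.1, (ihc xs).mpr ⟨w', hw', hcx.2⟩]
            · exact Or.inr ((ihs (x :: xs)).mpr ⟨w, hw, hpre⟩)

-- the concrete trie accepts exactly the trigger phrases (both sides literal)
lemma mem_trieWords_pyTrie (w : List Char) :
    w ∈ trieWords pyTrie ↔ w ∈ pyTriggers.map String.toList := by
  have h1 : (trieWords pyTrie).all (· ∈ pyTriggers.map String.toList) = true := by decide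
  have h2 : (pyTriggers.map String.toList).all (· ∈ trieWords pyTrie) = true := by decide
  rw [List.all_eq_true] at h1 h2
  constructor
  · intro h; simpa using h1 w h
  · intro h; simpa using h2 w h

-- 12 substring tests = positional trie scan
lemma any_isIn_eq_trieScan (cs : List Char) :
    pyTriggers.any (fun t => PySem.Chars.isIn t.toList cs)
      = (List.range cs.length).any (fun i => trieRun pyTrie (cs.drop i)) := by
  rw [Bool.eq_iff_iff]
  simp only [List.any_eq_true, List.mem_range]
  constructor
  · rintro ⟨t, ht, hin⟩
    obtain ⟨j, hpre⟩ := (PySem.Chars.exists_prefix_drop_iff_isIn t.toList cs).2 hin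
    have hne : t.toList ≠ [] := by
      have : t.toList ∈ trieWords pyTrie :=
        (mem_trieWords_pyTrie _).mpr (List.mem_map.mpr ⟨t, ht, rfl⟩)
      exact trieWords_ne_nil _ _ this
    have hj : j < cs.length := by
      by_contra hge
      rw [List.drop_eq_nil_of_le (by omega)] at hpre
      exact hne (List.prefix_nil.mp hpre)
    exact ⟨j, hj, (trieRun_iff _ _).mpr
      ⟨t.toList, (mem_trieWords_pyTrie _).mpr (List.mem_map.mpr ⟨t, ht, rfl⟩), hpre⟩⟩
  · rintro ⟨j, _, hrun⟩
    obtain ⟨w, hw, hpre⟩ := (trieRun_iff _ _).mp hrun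
    obtain ⟨t, ht, rfl⟩ := List.mem_map.mp ((mem_trieWords_pyTrie w).mp hw)
    exact ⟨t, ht, (PySem.Chars.exists_prefix_drop_iff_isIn t.toList cs).1 ⟨j, hpre⟩⟩

lemma per_message_eq (content : String) :
    is_prompt_injection content
      = (if content = "" then false
         else
           let lowered := PySem.Chars.lower content.toList
           (List.range lowered.length).any (fun i => trieRun pyTrie (lowered.drop i))) := by
  unfold is_prompt_injection
  by_cases h : content = ""
  · simp [h]
  · simp only [h, if_false]
    rw [← any_isIn_eq_trieScan]
    simp [PySem.Str.isIn_eq, PySem.Str.toList_lower]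

-- ===== VERDICT =====
theorem is_prompt_injection_in_history_spec : Claim_equal_is_prompt_injection_in_history := by
  intro history _
  unfold Spec_is_prompt_injection_in_history is_prompt_injection_in_history
    is_prompt_injection_in_history_alt
  congr 1
  funext item
  cases (PySem.Dict.mk item).get? "content" with
  | none => rfl
  | some content =>
      by_cases h : content = "" <;> simp [h, per_message_eq content]
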